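-- pv_equiv track=rewrite | github.com/kermit-o/Scouta | backend_consolidate_20251015-1755/backend_reorganized/core/services/feature_contracts.py | feature_required_paths
-- ===== SOURCE A (Python) =====
-- from typing import Dict, List
--
-- _BASE_PATHS: List[str] = [
--     "README.md",
--     "backend/app/requirements.txt",
--     "backend/app/main.py",
--     "backend/app/routers/health.py",
-- ]
--
-- _FEATURE_PATHS: Dict[str, List[str]] = {
--     "FastAPI": [],  # ya cubierto por _BASE_PATHS
--     "health": [],   # ya cubierto por routers/health.py
--
--     # CRUD de usuarios (estructura completa)
--     "users_crud": [
--         "backend/app/routers/users.py",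
--         "backend/app/models.py",
--         "backend/app/schemas.py",
--         "backend/app/db.py",
--     ],
--
--     # DB + migraciones
--     "postgres": [
--         "alembic.ini",
--         "alembic/env.py",
--         "alembic/versions/0001_init.py",
--     ],
--     "alembic": [
--         "alembic.ini",
--         "alembic/env.py",
--         "alembic/versions/0001_init.py",
--     ],
--
--     # Contenedores
--     "Dockerfile": [
--         "Dockerfile",
--     ],
--     "docker_compose": [
--         "docker-compose.yml",
--     ],
-- }
--
-- def feature_required_paths(features: List[str]) -> List[str]:
--     """Devuelve la lista de rutas requeridas por el conjunto de features."""
--     paths: List[str] = list(_BASE_PATHS)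
--     for f in features:
--         extra = _FEATURE_PATHS.get(f, [])
--         for p in extra:
--             if p not in paths:
--                 paths.append(p)
--     return paths
-- ===== SOURCE B (Python) =====
-- from typing import Dict, List
--
-- _BASE_PATHS: List[str] = [
--     "README.md",
--     "backend/app/requirements.txt",
--     "backend/app/main.py",
--     "backend/app/routers/health.py",
-- ]
--
-- # The per-feature path lists are pairwise disjoint or identical (postgres and
-- # alembic share the same list) and disjoint from _BASE_PATHS, so first-occurrence
-- # dedup of individual paths is the same as first-occurrence dedup of whole groups.
-- _GROUP_OF: Dict[str, int] = {
--     "users_crud": 0,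
--     "postgres": 1,
--     "alembic": 1,
--     "Dockerfile": 2,
--     "docker_compose": 3,
-- }
--
-- _GROUP_PATHS: List[List[str]] = [
--     [
--         "backend/app/routers/users.py",
--         "backend/app/models.py",
--         "backend/app/schemas.py",
--         "backend/app/db.py",
--     ],
--     [
--         "alembic.ini",
--         "alembic/env.py",
--         "alembic/versions/0001_init.py",
--     ],
--     ["Dockerfile"],
--     ["docker-compose.yml"],
-- ]
--
-- def feature_required_paths(features: List[str]) -> List[str]:
--     """Map features onto disjoint path groups, keep the groups in first-occurrence
--     order, then concatenate the groups' paths after the base paths."""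
--     order: List[int] = []
--     seen = set()
--     for f in features:
--         g = _GROUP_OF.get(f)
--         if g is not None and g not in seen:
--             seen.add(g)
--             order.append(g)
--     return _BASE_PATHS + [p for g in order for p in _GROUP_PATHS[g]]
-- ===== Notes on version B (the rewrite author's own statement) =====
-- stated objective: alternative
-- what changed: B replaces A's per-path membership-test append loop by a group-level algorithm: each feature is mapped to one of four precomputed disjoint path groups (postgres and alembic merged into one shared group), groups are deduplicated in first-occurrence order with a seen-set, and the group path lists are concatenated after the base paths; no individual path is ever tested for membership.
import Mathlib
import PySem

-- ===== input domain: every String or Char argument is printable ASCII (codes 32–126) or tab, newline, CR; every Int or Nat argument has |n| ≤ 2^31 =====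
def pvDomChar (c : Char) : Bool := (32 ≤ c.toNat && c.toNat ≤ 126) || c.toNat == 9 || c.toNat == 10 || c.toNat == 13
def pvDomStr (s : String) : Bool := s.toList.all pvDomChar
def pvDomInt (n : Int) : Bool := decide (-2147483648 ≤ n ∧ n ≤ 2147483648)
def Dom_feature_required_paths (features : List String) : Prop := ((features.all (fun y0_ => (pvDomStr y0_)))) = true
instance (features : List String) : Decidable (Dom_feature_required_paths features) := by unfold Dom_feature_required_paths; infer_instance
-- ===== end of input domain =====

-- B replaces A's per-path membership loop by dedup over four precomputed disjoint path groups ("alternative").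
-- ===== PORT A =====
def pvBasePaths : List String :=
  ["README.md",
   "backend/app/requirements.txt",
   "backend/app/main.py",
   "backend/app/routers/health.py"]

def pvFeaturePaths : PySem.Dict String (List String) :=
  PySem.Dict.ofList
    [("FastAPI", []),
     ("health", []),
     ("users_crud",
       ["backend/app/routers/users.py",
        "backend/app/models.py",
        "backend/app/schemas.py",
        "backend/app/db.py"]),
     ("postgres",
       ["alembic.ini",
        "alembic/env.py",
        "alembic/versions/0001_init.py"]),
     ("alembic",
       ["alembic.ini",
        "alembic/env.py",
        "alembic/versions/0001_init.py"]),
     ("Dockerfile", ["Dockerfile"]),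
     ("docker_compose", ["docker-compose.yml"])]

-- A: incremental loop — start from the base paths, append each feature path not yet present.
def feature_required_paths (features : List String) : List String :=
  features.foldl
    (fun paths f =>
      (pvFeaturePaths.getD f []).foldl
        (fun ps p => if ps.contains p then ps else ps ++ [p]) paths)
    pvBasePaths

-- ===== PORT B =====
def pvGroupOf : PySem.Dict String Int :=
  PySem.Dict.ofList
    [("users_crud", 0), ("postgres", 1), ("alembic", 1),
     ("Dockerfile", 2), ("docker_compose", 3)]

def pvGroupTable : List (List String) :=
  [["backend/app/routers/users.py",
    "backend/app/models.py",
    "backend/app/schemas.py",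
    "backend/app/db.py"],
   ["alembic.ini",
    "alembic/env.py",
    "alembic/versions/0001_init.py"],
   ["Dockerfile"],
   ["docker-compose.yml"]]

-- B: map features to group ids, dedup the group ids in first-occurrence order, concatenate groups.
def feature_required_paths_alt (features : List String) : List String :=
  let st := features.foldl
    (fun (st : PySem.Set Int × List Int) f =>
      match pvGroupOf.get? f with
      | none => st
      | some g => if PySem.Set.contains st.1 g then st else (PySem.Set.add st.1 g, st.2 ++ [g]))
    ([], [])
  pvBasePaths ++ st.2.flatMap (fun g => PySem.List.pyGetD pvGroupTable g [])

-- ===== PRECONDITION & SPEC =====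
def Spec_feature_required_paths (features : List String) (out : List String) : Prop := out = feature_required_paths_alt features
instance (features : List String) (out : List String) : Decidable (Spec_feature_required_paths features out) := by unfold Spec_feature_required_paths; infer_instance

-- ===== CLAIM =====
def Claim_equal_feature_required_paths : Prop := ∀ (features : List String), Dom_feature_required_paths features → Spec_feature_required_paths features (feature_required_paths features)

-- ===== LEMMAS AND PROOFS =====
def pvGP (g : Int) : List String := PySem.List.pyGetD pvGroupTable g []

-- per-feature correspondence between the two tables
lemma feat_cases (f : String) :
    (pvFeaturePaths.getD f [] = [] ∧ pvGroupOf.get? f = none) ∨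
    (∃ g, pvGroupOf.get? f = some g ∧ g ∈ ([0,1,2,3] : List Int) ∧ pvFeaturePaths.getD f [] = pvGP g) := by
  by_cases h1 : f = "users_crud"; · subst h1; right; exact ⟨0, by decide, by decide, by decide⟩
  by_cases h2 : f = "postgres";   · subst h2; right; exact ⟨1, by decide, by decide, by decide⟩
  by_cases h3 : f = "alembic";    · subst h3; right; exact ⟨1, by decide, by decide, by decide⟩
  by_cases h4 : f = "Dockerfile"; · subst h4; right; exact ⟨2, by decide, by decide, by decide⟩
  by_cases h5 : f = "docker_compose"; · subst h5; right; exact ⟨3, by decide, by decide, by decide⟩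
  by_cases h6 : f = "FastAPI";    · subst h6; left; exact ⟨by decide, by decide⟩
  by_cases h7 : f = "health";     · subst h7; left; exact ⟨by decide, by decide⟩
  left
  constructor
  · simp [pvFeaturePaths, PySem.Dict.ofList, PySem.Dict.update, PySem.Dict.getD_eq_get?_getD, PySem.Dict.get?_insert, PySem.Dict.get?_empty, h1, h2, h3, h4, h5, h6, h7]
  · simp [pvGroupOf, PySem.Dict.ofList, PySem.Dict.update, PySem.Dict.get?_insert, PySem.Dict.get?_empty, h1, h2, h3, h4, h5]

-- table facts, decided once
lemma tbl_base : ∀ g ∈ ([0,1,2,3] : List Int), ∀ p ∈ pvGP g, p ∉ pvBasePaths := by decide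
lemma tbl_disjoint : ∀ g ∈ ([0,1,2,3] : List Int), ∀ g' ∈ ([0,1,2,3] : List Int), g ≠ g' → ∀ p ∈ pvGP g, p ∉ pvGP g' := by decide
lemma tbl_nodup : ∀ g ∈ ([0,1,2,3] : List Int), (pvGP g).Nodup := by decide

-- A's inner dedup-append fold when every element is already present: no-op
lemma fold_of_all_mem (xs acc : List String) (h : ∀ p ∈ xs, p ∈ acc) :
    xs.foldl (fun ps p => if ps.contains p then ps else ps ++ [p]) acc = acc := by
  induction xs with
  | nil => rfl
  | cons x xs ih =>
    simp only [List.foldl_cons]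
    rw [if_pos (by simpa using h x (by simp))]
    exact ih (fun p hp => h p (by simp [hp]))

-- A's inner dedup-append fold over fresh distinct elements: plain append
lemma fold_of_fresh (xs acc : List String) (hnd : xs.Nodup) (h : ∀ p ∈ xs, p ∉ acc) :
    xs.foldl (fun ps p => if ps.contains p then ps else ps ++ [p]) acc = acc ++ xs := by
  induction xs generalizing acc with
  | nil => simp
  | cons x xs ih =>
    simp only [List.foldl_cons]
    rw [if_neg (by simpa using h x (by simp))]
    rw [ih (acc ++ [x]) hnd.of_cons]
    · simp
    · intro p hp
      simp only [List.mem_append, List.mem_singleton]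
      rintro (hc | rfl)
      · exact h p (by simp [hp]) hc
      · exact (List.nodup_cons.mp hnd).1 hp

-- the step functions, named for the induction
def stepA (paths : List String) (f : String) : List String :=
  (pvFeaturePaths.getD f []).foldl (fun ps p => if ps.contains p then ps else ps ++ [p]) paths

def stepB (st : PySem.Set Int × List Int) (f : String) : PySem.Set Int × List Int :=
  match pvGroupOf.get? f with
  | none => st
  | some g => if PySem.Set.contains st.1 g then st else (PySem.Set.add st.1 g, st.2 ++ [g])

-- loop invariant: A's accumulated paths are the base paths plus the groups B has recorded
lemma main_inv (fs : List String) (ord : List Int)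
    (hnd : ord.Nodup) (hrange : ∀ g ∈ ord, g ∈ ([0,1,2,3] : List Int)) :
    fs.foldl stepA (pvBasePaths ++ ord.flatMap pvGP)
      = pvBasePaths ++ (fs.foldl stepB (ord, ord)).2.flatMap pvGP := by
  induction fs generalizing ord with
  | nil => rfl
  | cons f fs ih =>
    simp only [List.foldl_cons]
    rcases feat_cases f with ⟨hA, hB⟩ | ⟨g, hB, hg, hA⟩
    · rw [show stepA (pvBasePaths ++ ord.flatMap pvGP) f = pvBasePaths ++ ord.flatMap pvGP by
        simp [stepA, hA]]
      rw [show stepB (ord, ord) f = (ord, ord) by simp [stepB, hB]]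
      exact ih ord hnd hrange
    · by_cases hmem : g ∈ ord
      · rw [show stepA (pvBasePaths ++ ord.flatMap pvGP) f = pvBasePaths ++ ord.flatMap pvGP by
          unfold stepA
          rw [hA]
          exact fold_of_all_mem _ _ (fun p hp => by
            simp only [List.mem_append, List.mem_flatMap]
            exact Or.inr ⟨g, hmem, hp⟩)]
        rw [show stepB (ord, ord) f = (ord, ord) by
          simp [stepB, hB, PySem.Set.contains_eq_listContains]
          simpa using hmem]
        exact ih ord hnd hrange
      · rw [show stepA (pvBasePaths ++ ord.flatMap pvGP) f
            = pvBasePaths ++ (ord ++ [g]).flatMap pvGP by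
          unfold stepA
          rw [hA]
          rw [fold_of_fresh _ _ (tbl_nodup g hg) (fun p hp hc => by
            rcases List.mem_append.mp hc with hb | hf
            · exact tbl_base g hg p hp hb
            · rcases List.mem_flatMap.mp hf with ⟨g', hg', hp'⟩
              exact tbl_disjoint g' (hrange g' hg') g hg (fun he => hmem (he ▸ hg')) p hp' hp)]
          simp]
        rw [show stepB (ord, ord) f = (ord ++ [g], ord ++ [g]) by
          simp only [stepB, hB]
          rw [if_neg (by simpa [PySem.Set.contains_eq_listContains] using hmem)]
          rw [PySem.Set.add_of_not_mem hmem]]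
        exact ih (ord ++ [g]) (by simp only [List.nodup_append, List.nodup_singleton, hnd, true_and]; intro a ha b hb heq; rw [List.mem_singleton] at hb; subst hb; exact hmem (heq ▸ ha))
          (fun g' hg' => by
            rcases List.mem_append.mp hg' with h | h
            · exact hrange g' h
            · rw [List.mem_singleton.mp h]; exact hg)

-- ===== VERDICT =====
theorem feature_required_paths_spec : Claim_equal_feature_required_paths := by
  intro features _
  unfold Spec_feature_required_paths feature_required_paths feature_required_paths_alt
  show List.foldl stepA pvBasePaths features
      = pvBasePaths ++ (List.foldl stepB ([], []) features).2.flatMap pvGP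
  simpa using main_inv features [] (by simp) (by simp)
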